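-- pv_equiv track=rewrite | github.com/theo022002/Computational-geometry | Convex_Hull/Quick_Hull.py | find_min_max_y
-- ===== SOURCE A (Python) =====
-- def find_min_max_y(points):                                                        # Briskei ta shmeia me thn megaluterh kai mikroterh tetagmenh
--     if len(points) == 0:                                                           # An to sunolo einai keno epistrefoume None
--         return None, None
--
--     min_point = max_point = points[0]                                              # Arxikopoioume to max, min points me to prwto shmeio
--     min_y = max_y = points[0][1]                                                   # Arxikopoioume kai thn min kai thn max y-suntetagmenh me thn y-suntetagmenh tou prwtou shmeiou
--
--     for point in points[1:]:                                                       # Gia ola ta shmeia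
--         y = point[1]                                                               # Kratame thn y suntetagmenh tou trexontos shmeiou
--         if y < min_y:                                                              # An einai mikroterh apo to prohgoumeno shmeio
--             min_y = y                                                              # Ananewnoume to elaxisto stoixeio kai thn antistoixh suntetagmenh tou
--             min_point = point
--         elif y > max_y:                                                            # Elegxoume an to trexon shmeio exei megaluterh tetagmenh apo to prohgoumeno an isxuei
--             max_y = y                                                              # Ananewnoume to maximum stoixeio
--             max_point = point
--
--     return min_point, max_point                                                    # Epistrefoume to max kai to min stoixeio
-- ===== SOURCE B (Python) =====
-- def find_min_max_y(points):
--     if len(points) == 0: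
--         return None, None
--     return min(points, key=lambda p: p[1]), max(points, key=lambda p: p[1])
-- ===== Notes on version B (the rewrite author's own statement) =====
-- stated objective: idiomatic
-- what changed: Replaced the hand-rolled single loop carrying four state variables (min/max point and their y's, with an elif coupling the two updates) by two independent built-in min/max passes keyed on the y-coordinate; first-occurrence tie-breaking is preserved because min/max return the first extremal element.
import Mathlib
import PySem

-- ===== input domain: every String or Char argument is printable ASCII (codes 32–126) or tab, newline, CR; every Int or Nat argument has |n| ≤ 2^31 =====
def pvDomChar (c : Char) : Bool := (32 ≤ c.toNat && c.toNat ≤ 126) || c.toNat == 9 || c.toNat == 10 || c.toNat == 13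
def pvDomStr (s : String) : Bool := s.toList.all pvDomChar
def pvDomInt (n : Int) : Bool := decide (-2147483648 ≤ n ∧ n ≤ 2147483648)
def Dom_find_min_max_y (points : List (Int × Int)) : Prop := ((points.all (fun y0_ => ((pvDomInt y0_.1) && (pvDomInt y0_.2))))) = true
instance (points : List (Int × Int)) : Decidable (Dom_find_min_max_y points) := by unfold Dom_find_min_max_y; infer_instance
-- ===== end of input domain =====

-- B replaces A's single four-variable loop by two independent first-occurrence min/max passes keyed on y (idiomatic; same O(n) cost).
-- ===== PORT A =====
def find_min_max_y (points : List (Int × Int)) : (Option (Int × Int)) × (Option (Int × Int)) :=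
  match points with
  | [] => (none, none)
  | p0 :: _ =>
    -- min_point = max_point = points[0]; min_y = max_y = points[0][1]; loop over points[1:]
    let s := (PySem.List.slice points (some 1) none).foldl
      (fun (st : (Int × Int) × (Int × Int) × Int × Int) point =>
        let y := point.2
        if y < st.2.2.1 then (point, st.2.1, y, st.2.2.2)
        else if y > st.2.2.2 then (st.1, point, st.2.2.1, y)
        else st)
      (p0, p0, p0.2, p0.2)
    (some s.1, some s.2.1)

-- ===== PORT B =====
def find_min_max_y_alt (points : List (Int × Int)) : (Option (Int × Int)) × (Option (Int × Int)) :=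
  match points with
  | [] => (none, none)
  | _ :: _ =>
    (PySem.List.min? points (fun p => p.2), PySem.List.max? points (fun p => p.2))

-- ===== PRECONDITION & SPEC =====
def Spec_find_min_max_y (points : List (Int × Int)) (out : (Option (Int × Int)) × (Option (Int × Int))) : Prop := out = find_min_max_y_alt points
instance (points : List (Int × Int)) (out : (Option (Int × Int)) × (Option (Int × Int))) : Decidable (Spec_find_min_max_y points out) := by unfold Spec_find_min_max_y; infer_instance

-- ===== CLAIM (what is proved, stated in full; the proofs are below) =====
def Claim_equal_find_min_max_y : Prop := ∀ (points : List (Int × Int)), Dom_find_min_max_y points → Spec_find_min_max_y points (find_min_max_y points)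

-- ===== LEMMAS AND PROOFS =====

-- On a nonempty list, min?/max? with the y-key are the plain running-min / running-max folds.
lemma min?_cons_y (p : Int × Int) (t : List (Int × Int)) :
    PySem.List.min? (p :: t) (fun q => q.2)
      = some (t.foldl (fun m x => if x.2 < m.2 then x else m) p) := by
  induction t generalizing p with
  | nil => rfl
  | cons q t ih =>
    have h1 : PySem.List.min? (p :: q :: t) (fun r => r.2)
        = PySem.List.min? ((if q.2 < p.2 then q else p) :: t) (fun r => r.2) := by
      simp only [PySem.List.min?, List.foldl_cons]; split_ifs <;> rfl
    rw [h1, ih, List.foldl_cons]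

lemma max?_cons_y (p : Int × Int) (t : List (Int × Int)) :
    PySem.List.max? (p :: t) (fun q => q.2)
      = some (t.foldl (fun m x => if m.2 < x.2 then x else m) p) := by
  induction t generalizing p with
  | nil => rfl
  | cons q t ih =>
    have h1 : PySem.List.max? (p :: q :: t) (fun r => r.2)
        = PySem.List.max? ((if p.2 < q.2 then q else p) :: t) (fun r => r.2) := by
      simp only [PySem.List.max?, List.foldl_cons]; split_ifs <;> rfl
    rw [h1, ih, List.foldl_cons]

-- A's coupled four-component loop equals the two independent running-min / running-max folds,
-- under the invariant min_y ≤ max_y (which rules the elif coupling irrelevant).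
lemma loop_eq (t : List (Int × Int)) :
    ∀ mp xp : Int × Int, mp.2 ≤ xp.2 →
    t.foldl
      (fun (st : (Int × Int) × (Int × Int) × Int × Int) point =>
        let y := point.2
        if y < st.2.2.1 then (point, st.2.1, y, st.2.2.2)
        else if y > st.2.2.2 then (st.1, point, st.2.2.1, y)
        else st)
      (mp, xp, mp.2, xp.2)
    = (t.foldl (fun m x => if x.2 < m.2 then x else m) mp,
       t.foldl (fun m x => if m.2 < x.2 then x else m) xp,
       (t.foldl (fun m x => if x.2 < m.2 then x else m) mp).2,
       (t.foldl (fun m x => if m.2 < x.2 then x else m) xp).2) := by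
  induction t with
  | nil => intro mp xp h; rfl
  | cons p t ih =>
    intro mp xp h
    simp only [List.foldl]
    by_cases h1 : p.2 < mp.2
    · have hx : ¬ xp.2 < p.2 := by omega
      simp only [h1, if_pos, hx, if_neg, not_false_iff, if_true]
      exact ih p xp (by omega)
    · by_cases h2 : xp.2 < p.2
      · simp only [h1, h2, if_neg, if_pos, not_false_iff]
        exact ih mp p (by omega)
      · simp only [h1, h2, if_neg, not_false_iff]
        exact ih mp xp h

-- ===== VERDICT (by name: the statement is the Claim_ definition above) =====
theorem find_min_max_y_spec : Claim_equal_find_min_max_y := by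
  intro points _
  unfold Spec_find_min_max_y find_min_max_y find_min_max_y_alt
  match points with
  | [] => rfl
  | p0 :: rest =>
    simp only [PySem.List.slice_from_one, List.tail_cons, loop_eq rest p0 p0 le_rfl,
      min?_cons_y, max?_cons_y]
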